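-- pv_equiv track=rewrite | github.com/Liiiqueur/insider_exfil_tool | parsers/printer_spool_parser.py | _guess_printer_info
-- ===== SOURCE A (Python) =====
-- from typing import Optional, Tuple
--
-- def _guess_printer_info(strings: list[str]) -> Tuple[Optional[str], Optional[str]]:
--     printer_name = None
--     document_name = None
--     for text in strings:
--         lower = text.lower()
--         if not printer_name and ("printer" in lower or "microsoft print" in lower or "hp " in lower):
--             printer_name = text
--         if not document_name and any(token in lower for token in (".doc", ".pdf", ".ppt", ".xls", ".txt")):
--             document_name = text
--     return printer_name, document_name
-- ===== SOURCE B (Python) =====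
-- from typing import Optional, Tuple
--
-- def _guess_printer_info(strings: list[str]) -> Tuple[Optional[str], Optional[str]]:
--     printer_name = next(
--         (t for t in strings
--          if "printer" in t.lower() or "microsoft print" in t.lower() or "hp " in t.lower()),
--         None)
--     document_name = next(
--         (t for t in strings
--          if any(tok in t.lower() for tok in (".doc", ".pdf", ".ppt", ".xls", ".txt"))),
--         None)
--     return printer_name, document_name
-- ===== Notes on version B (the rewrite author's own statement) =====
-- stated objective: simpler
-- what changed: Replaces the single fused loop with flag guards by two independent short-circuiting scans (next over a generator, defaulting to None), one per field.
import Mathlib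
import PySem

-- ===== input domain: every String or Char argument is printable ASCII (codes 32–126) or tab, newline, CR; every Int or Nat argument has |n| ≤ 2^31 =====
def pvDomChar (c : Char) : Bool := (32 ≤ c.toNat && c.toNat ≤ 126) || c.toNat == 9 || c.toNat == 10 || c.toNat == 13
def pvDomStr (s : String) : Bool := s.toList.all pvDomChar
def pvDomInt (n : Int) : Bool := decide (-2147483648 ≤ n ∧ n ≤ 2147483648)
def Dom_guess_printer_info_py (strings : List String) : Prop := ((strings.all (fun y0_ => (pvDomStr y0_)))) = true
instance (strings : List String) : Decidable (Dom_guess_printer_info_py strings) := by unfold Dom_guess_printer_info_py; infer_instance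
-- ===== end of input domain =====

-- B replaces A's single flag-guarded loop with two independent short-circuiting scans, one per field (objective: simpler).

-- ===== PORT A =====
-- Python truthiness of an Optional[str]: 'not x' is true iff x is None or the empty string
def pyFalsyStr (o : Option String) : Bool := o == none || o == some ""

def guess_printer_info_py (strings : List String) : Option String × Option String :=
  strings.foldl
    (fun (st : Option String × Option String) text =>
      let lower := PySem.Str.lower text
      let printer_name :=
        if pyFalsyStr st.1 &&
            (PySem.Str.isIn "printer" lower || PySem.Str.isIn "microsoft print" lower ||
              PySem.Str.isIn "hp " lower) then some text else st.1
      let document_name :=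
        if pyFalsyStr st.2 &&
            ([".doc", ".pdf", ".ppt", ".xls", ".txt"].any (fun token => PySem.Str.isIn token lower))
          then some text else st.2
      (printer_name, document_name))
    (none, none)

-- ===== PORT B =====
def isPrinterLike (t : String) : Bool :=
  PySem.Str.isIn "printer" (PySem.Str.lower t) ||
  PySem.Str.isIn "microsoft print" (PySem.Str.lower t) ||
  PySem.Str.isIn "hp " (PySem.Str.lower t)

def isDocumentLike (t : String) : Bool :=
  [".doc", ".pdf", ".ppt", ".xls", ".txt"].any (fun tok => PySem.Str.isIn tok (PySem.Str.lower t))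

def guess_printer_info_py_alt (strings : List String) : Option String × Option String :=
  (strings.find? isPrinterLike, strings.find? isDocumentLike)

-- ===== PRECONDITION & SPEC =====
def Spec_guess_printer_info_py (strings : List String) (out : Option String × Option String) : Prop := out = guess_printer_info_py_alt strings
instance (strings : List String) (out : Option String × Option String) : Decidable (Spec_guess_printer_info_py strings out) := by unfold Spec_guess_printer_info_py; infer_instance

-- ===== CLAIM (what is proved, stated in full; the proofs are below) =====
def Claim_equal_guess_printer_info_py : Prop := ∀ (strings : List String), Dom_guess_printer_info_py strings → Spec_guess_printer_info_py strings (guess_printer_info_py strings)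

-- ===== LEMMAS AND PROOFS =====

-- one guarded first-match accumulator step, parametric in the test
def stepOne (f : String → Bool) (o : Option String) (t : String) : Option String :=
  if pyFalsyStr o && f t then some t else o

-- a matching string is nonempty, so once set the accumulator is never falsy again
lemma printerLike_ne_empty (t : String) (h : isPrinterLike t = true) : (t == "") = false := by
  rcases eq_or_ne t "" with he | he
  · subst he; exact absurd h (by decide)
  · simpa using he

lemma documentLike_ne_empty (t : String) (h : isDocumentLike t = true) : (t == "") = false := by
  rcases eq_or_ne t "" with he | he
  · subst he; exact absurd h (by decide)
  · simpa using he

-- A's fold is the product of two independent guarded folds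
lemma foldA_pair (strings : List String) : ∀ (p d : Option String),
    strings.foldl
      (fun (st : Option String × Option String) text =>
        let lower := PySem.Str.lower text
        let printer_name :=
          if pyFalsyStr st.1 &&
              (PySem.Str.isIn "printer" lower || PySem.Str.isIn "microsoft print" lower ||
                PySem.Str.isIn "hp " lower) then some text else st.1
        let document_name :=
          if pyFalsyStr st.2 &&
              ([".doc", ".pdf", ".ppt", ".xls", ".txt"].any (fun token => PySem.Str.isIn token lower))
            then some text else st.2
        (printer_name, document_name))
      (p, d)
    = (strings.foldl (stepOne isPrinterLike) p, strings.foldl (stepOne isDocumentLike) d) := by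
  induction strings with
  | nil => intro p d; rfl
  | cons t rest ih =>
    intro p d
    simp only [List.foldl_cons]
    exact ih _ _

-- the guarded fold is a short-circuiting first-match scan
lemma foldOne_eq (f : String → Bool) (hf : ∀ t, f t = true → (t == "") = false)
    (strings : List String) : ∀ (o : Option String),
    strings.foldl (stepOne f) o = if pyFalsyStr o then (strings.find? f).or o else o := by
  induction strings with
  | nil =>
    intro o
    cases ho : pyFalsyStr o with
    | false => simp [ho]
    | true => simp [ho, Option.or_none]
  | cons t rest ih =>
    intro o
    simp only [List.foldl_cons, List.find?_cons]
    cases ho : pyFalsyStr o with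
    | false => simp [stepOne, ho, ih]
    | true =>
      cases hm : f t with
      | false => simp [stepOne, ho, hm, ih]
      | true =>
        have hne : pyFalsyStr (some t) = false := by
          simp [pyFalsyStr]
          simpa using hf t hm
        simp [stepOne, ho, hm, ih, hne]

-- ===== VERDICT (by name: the statement is the Claim_ definition above) =====
theorem guess_printer_info_py_spec : Claim_equal_guess_printer_info_py := by
  intro strings _
  show guess_printer_info_py strings = guess_printer_info_py_alt strings
  unfold guess_printer_info_py guess_printer_info_py_alt
  rw [foldA_pair, foldOne_eq isPrinterLike printerLike_ne_empty,
      foldOne_eq isDocumentLike documentLike_ne_empty]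
  simp [pyFalsyStr]
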